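-- pv_equiv track=rewrite | github.com/SZelaya1/Tic-Tac-Toe-AI-Game | tictactoe.py | result
-- ===== SOURCE A (Python) =====
-- X = "X"
--
-- O = "O"
--
-- EMPTY = None
--
-- def player(board):
--     # Returns player who has the next turn on a board.
--     X_count = 0
--     O_count = 0
--     for row in board:
--         for element in row:
--             if element == X:
--                 X_count += 1
--             elif element == O:
--                 O_count += 1
--     if X_count == O_count:
--         return X
--     else:
--         return O
--
-- def actions(board):
--     # Returns set of all possible actions (i, j) available on the board.
--     possible_actions = set()
--     for r_index, row in enumerate(board):
--         for index, element in enumerate(row):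
--             if element == EMPTY:
--                 possible_actions.add((r_index, index))
--     return possible_actions
--
-- def result(board, action):
--     # Returns the board that results from making move (i, j) on the board.
--     new_board = []
--     for row in board:
--         new_board.append(row.copy())
--     if action not in actions(board):
--         raise Exception("Invalid action")
--     for r_index, row in enumerate(board):
--         for index, element in enumerate(row):
--             if (r_index, index) == action:
--                 new_board[r_index][index] = player(board)
--     return new_board
-- ===== SOURCE B (Python) =====
-- def result(board, action):
--     # One pass: copy rows, count marks and collect empty cells; then one direct write.
--     new_board = []
--     x_count = 0
--     o_count = 0
--     empties = set()
--     for r, row in enumerate(board):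
--         new_board.append(list(row))
--         for c, cell in enumerate(row):
--             if cell == "X":
--                 x_count += 1
--             elif cell == "O":
--                 o_count += 1
--             elif cell is None:
--                 empties.add((r, c))
--     if action not in empties:
--         raise Exception("Invalid action")
--     new_board[action[0]][action[1]] = "X" if x_count == o_count else "O"
--     return new_board
-- ===== Notes on version B (the rewrite author's own statement) =====
-- stated objective: simpler
-- what changed: Replaces A's four separate board traversals (copy loop, actions() scan, player() count scan, and a full nested replacement scan) with a single enumerate pass that copies rows, counts X/O and collects empty cells, followed by one direct indexed write.
import Mathlib
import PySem

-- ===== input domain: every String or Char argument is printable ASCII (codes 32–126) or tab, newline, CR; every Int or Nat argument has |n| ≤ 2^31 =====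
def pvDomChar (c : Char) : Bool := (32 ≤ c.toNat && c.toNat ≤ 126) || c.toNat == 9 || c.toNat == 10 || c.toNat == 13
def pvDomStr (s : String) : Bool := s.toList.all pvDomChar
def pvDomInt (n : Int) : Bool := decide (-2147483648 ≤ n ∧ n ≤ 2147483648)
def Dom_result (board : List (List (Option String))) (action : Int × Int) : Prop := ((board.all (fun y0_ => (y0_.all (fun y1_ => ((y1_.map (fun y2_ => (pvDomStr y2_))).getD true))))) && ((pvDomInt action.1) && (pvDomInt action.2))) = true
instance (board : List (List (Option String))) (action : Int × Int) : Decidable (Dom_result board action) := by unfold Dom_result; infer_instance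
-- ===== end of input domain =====

-- B replaces A's four separate board traversals with one enumerate pass plus a single indexed write.


-- ===== PORT A =====
-- player(board): count X's and O's over the whole board, X moves on a tie.
def playerA (board : List (List (Option String))) : String :=
  let st := board.foldl
    (fun (st : Int × Int) row => row.foldl
      (fun (st : Int × Int) el =>
        if el = some "X" then (st.1 + 1, st.2)
        else if el = some "O" then (st.1, st.2 + 1)
        else st) st) (0, 0)
  if st.1 = st.2 then "X" else "O"

-- actions(board): set of (r, c) of all EMPTY (None) cells.
def actionsA (board : List (List (Option String))) : PySem.Set (Int × Int) :=
  (PySem.List.enumerate board 0).foldl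
    (fun s rp => (PySem.List.enumerate rp.2 0).foldl
      (fun s2 cp => if cp.2 = none then PySem.Set.add s2 (rp.1, cp.1) else s2) s)
    PySem.Set.empty

-- result(board, action): copy rows, reject invalid action, scan the whole board writing player(board) at the matching cell.
-- On an invalid action Python raises Exception("Invalid action") — those inputs are excluded by Pre_result; the port returns the copy there.
def result (board : List (List (Option String))) (action : Int × Int) : List (List (Option String)) :=
  let new_board := board.foldl (fun nb row => nb ++ [row]) ([] : List (List (Option String)))
  if action ∈ actionsA board then
    (PySem.List.enumerate board 0).foldl
      (fun nb rp => (PySem.List.enumerate rp.2 0).foldl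
        (fun nb2 cp =>
          if (rp.1, cp.1) = action then
            PySem.List.pySetD nb2 rp.1
              (PySem.List.pySetD (PySem.List.pyGetD nb2 rp.1 []) cp.1 (some (playerA board)))
          else nb2) nb)
      new_board
  else new_board

-- ===== PORT B =====
-- One enumerate pass building the row copies while counting X/O and collecting empty cells, then a single direct write.
-- On an invalid action Python raises Exception("Invalid action") — excluded by Pre_result; the port returns the copy there.
def result_alt (board : List (List (Option String))) (action : Int × Int) : List (List (Option String)) :=
  let st := (PySem.List.enumerate board 0).foldl
    (fun (st : List (List (Option String)) × Int × Int × PySem.Set (Int × Int)) rp =>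
      (PySem.List.enumerate rp.2 0).foldl
        (fun (st2 : List (List (Option String)) × Int × Int × PySem.Set (Int × Int)) cp =>
          if cp.2 = some "X" then (st2.1, st2.2.1 + 1, st2.2.2.1, st2.2.2.2)
          else if cp.2 = some "O" then (st2.1, st2.2.1, st2.2.2.1 + 1, st2.2.2.2)
          else if cp.2 = none then (st2.1, st2.2.1, st2.2.2.1, PySem.Set.add st2.2.2.2 (rp.1, cp.1))
          else st2)
        (st.1 ++ [rp.2], st.2.1, st.2.2.1, st.2.2.2))
    (([] : List (List (Option String))), (0 : Int), (0 : Int), (PySem.Set.empty : PySem.Set (Int × Int)))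
  if action ∈ st.2.2.2 then
    PySem.List.pySetD st.1 action.1
      (PySem.List.pySetD (PySem.List.pyGetD st.1 action.1 []) action.2
        (some (if st.2.1 = st.2.2.1 then "X" else "O")))
  else st.1

-- ===== PRECONDITION & SPEC =====
-- Pre_result: exactly the inputs where Python's result returns (action names an in-range EMPTY cell);
-- elsewhere A raises Exception("Invalid action").
def Pre_result (board : List (List (Option String))) (action : Int × Int) : Prop :=
  ∃ r : Fin board.length, ∃ c : Fin (board.get r).length,
    (board.get r).get c = none ∧ action = ((r : Int), (c : Int))
instance (board : List (List (Option String))) (action : Int × Int) : Decidable (Pre_result board action) := by unfold Pre_result; infer_instance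

def pvWitness_result : List (List (Option String)) × (Int × Int) := ([[none, some "X"], [some "O", none]], (0, 0))

def Spec_result (board : List (List (Option String))) (action : Int × Int) (out : List (List (Option String))) : Prop := out = result_alt board action
instance (board : List (List (Option String))) (action : Int × Int) (out : List (List (Option String))) : Decidable (Spec_result board action out) := by unfold Spec_result; infer_instance

-- ===== CLAIM (what is proved, stated in full; the proofs are below) =====
def Claim_equal_result : Prop := ∀ (board : List (List (Option String))) (action : Int × Int), Dom_result board action → Pre_result board action → Spec_result board action (result board action)

-- ===== LEMMAS AND PROOFS =====

-- B's combined inner loop splits into A's count fold and A's actions inner fold.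
lemma pv_inner_split (row : List (Option String)) (j ri : Int)
    (nb : List (List (Option String))) (xc oc : Int) (es : PySem.Set (Int × Int)) :
  (PySem.List.enumerate row j).foldl
    (fun (st2 : List (List (Option String)) × Int × Int × PySem.Set (Int × Int)) cp =>
      if cp.2 = some "X" then (st2.1, st2.2.1 + 1, st2.2.2.1, st2.2.2.2)
      else if cp.2 = some "O" then (st2.1, st2.2.1, st2.2.2.1 + 1, st2.2.2.2)
      else if cp.2 = none then (st2.1, st2.2.1, st2.2.2.1, PySem.Set.add st2.2.2.2 (ri, cp.1))
      else st2) (nb, xc, oc, es)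
  = (nb,
     (row.foldl (fun (st : Int × Int) el =>
        if el = some "X" then (st.1 + 1, st.2)
        else if el = some "O" then (st.1, st.2 + 1)
        else st) (xc, oc)).1,
     (row.foldl (fun (st : Int × Int) el =>
        if el = some "X" then (st.1 + 1, st.2)
        else if el = some "O" then (st.1, st.2 + 1)
        else st) (xc, oc)).2,
     (PySem.List.enumerate row j).foldl
       (fun s2 cp => if cp.2 = none then PySem.Set.add s2 (ri, cp.1) else s2) es) := by
  induction row generalizing j xc oc es with
  | nil => simp [PySem.List.enumerate_nil]
  | cons el row ih =>
    rw [PySem.List.enumerate_cons]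
    simp only [List.foldl_cons]
    rcases el with _ | s
    · simp [ih]
    · by_cases hx : (some s : Option String) = some "X"
      · simp [hx, ih]
      · by_cases ho : (some s : Option String) = some "O"
        · simp [ho, ih]
        · simp [hx, ho, ih]

-- B's single pass splits into A's copy, count, and actions folds.
lemma pv_bfold_split (rows : List (List (Option String))) (k : Int)
    (nb : List (List (Option String))) (xc oc : Int) (es : PySem.Set (Int × Int)) :
  (PySem.List.enumerate rows k).foldl
    (fun (st : List (List (Option String)) × Int × Int × PySem.Set (Int × Int)) rp =>
      (PySem.List.enumerate rp.2 0).foldl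
        (fun (st2 : List (List (Option String)) × Int × Int × PySem.Set (Int × Int)) cp =>
          if cp.2 = some "X" then (st2.1, st2.2.1 + 1, st2.2.2.1, st2.2.2.2)
          else if cp.2 = some "O" then (st2.1, st2.2.1, st2.2.2.1 + 1, st2.2.2.2)
          else if cp.2 = none then (st2.1, st2.2.1, st2.2.2.1, PySem.Set.add st2.2.2.2 (rp.1, cp.1))
          else st2)
        (st.1 ++ [rp.2], st.2.1, st.2.2.1, st.2.2.2)) (nb, xc, oc, es)
  = (nb ++ rows,
     (rows.foldl (fun (st : Int × Int) row => row.foldl (fun (st : Int × Int) el =>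
        if el = some "X" then (st.1 + 1, st.2)
        else if el = some "O" then (st.1, st.2 + 1)
        else st) st) (xc, oc)).1,
     (rows.foldl (fun (st : Int × Int) row => row.foldl (fun (st : Int × Int) el =>
        if el = some "X" then (st.1 + 1, st.2)
        else if el = some "O" then (st.1, st.2 + 1)
        else st) st) (xc, oc)).2,
     (PySem.List.enumerate rows k).foldl
       (fun s rp => (PySem.List.enumerate rp.2 0).foldl
         (fun s2 cp => if cp.2 = none then PySem.Set.add s2 (rp.1, cp.1) else s2) s) es) := by
  induction rows generalizing k nb xc oc es with
  | nil => simp [PySem.List.enumerate_nil]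
  | cons row rest ih =>
    rw [PySem.List.enumerate_cons]
    simp only [List.foldl_cons]
    rw [pv_inner_split]
    rw [ih]
    simp

-- The inner replacement loop is the identity when no index pair can match the action.
lemma pv_repl_inner_none (v : Option String) (a : Int × Int) (ri : Int)
    (row : List (Option String)) (j : Int) (nb : List (List (Option String)))
    (h : ∀ p : Int × Option String, p ∈ PySem.List.enumerate row j → (ri, p.1) ≠ a) :
  (PySem.List.enumerate row j).foldl
    (fun nb2 cp =>
      if (ri, cp.1) = a then
        PySem.List.pySetD nb2 ri
          (PySem.List.pySetD (PySem.List.pyGetD nb2 ri []) cp.1 v)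
      else nb2) nb = nb := by
  induction row generalizing j nb with
  | nil => simp [PySem.List.enumerate_nil]
  | cons el row ih =>
    rw [PySem.List.enumerate_cons]
    simp only [List.foldl_cons]
    rw [if_neg (h (j, el) (by simp [PySem.List.enumerate_cons]))]
    exact ih _ _ (fun p hp => h p (by rw [PySem.List.enumerate_cons]; exact List.mem_cons_of_mem _ hp))

-- The inner replacement loop on the matching row writes the cell exactly once.
lemma pv_repl_inner_eq (v : Option String) (r c : Nat)
    (row : List (Option String)) (j : Nat) (nb : List (List (Option String))) :
  (PySem.List.enumerate row (j : Int)).foldl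
    (fun nb2 cp =>
      if ((r : Int), cp.1) = ((r : Int), (c : Int)) then
        PySem.List.pySetD nb2 (r : Int)
          (PySem.List.pySetD (PySem.List.pyGetD nb2 (r : Int) []) cp.1 v)
      else nb2) nb
  = if j ≤ c ∧ c - j < row.length then
      PySem.List.pySetD nb (r : Int)
        (PySem.List.pySetD (PySem.List.pyGetD nb (r : Int) []) (c : Int) v)
    else nb := by
  induction row generalizing j nb with
  | nil => simp [PySem.List.enumerate_nil]
  | cons el row ih =>
    rw [PySem.List.enumerate_cons]
    simp only [List.foldl_cons]
    by_cases hj : j = c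
    · subst hj
      rw [if_pos rfl]
      rw [pv_repl_inner_none v ((r : Int), (j : Int)) (r : Int) row ((j : Int) + 1)]
      · simp
      · intro p hp
        rcases ((PySem.List.mem_enumerate_iff _ _ _).1 hp) with ⟨k, hk, rfl⟩
        simp only [ne_eq, Prod.mk.injEq, not_and]
        intro _
        omega
    · have hne : (((r : Int), (j : Int)) : Int × Int) ≠ ((r : Int), (c : Int)) := by
        simp only [ne_eq, Prod.mk.injEq, not_and]
        intro _ h2
        exact hj (by exact_mod_cast h2)
      rw [if_neg hne]
      have : ((j : Int) + 1) = ((j + 1 : Nat) : Int) := by push_cast; ring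
      rw [this, ih]
      have : (j + 1 ≤ c ∧ c - (j + 1) < row.length) ↔ (j ≤ c ∧ c - j < row.length + 1) := by omega
      simp only [List.length_cons]
      rw [if_congr this rfl rfl]
      rfl

-- A's whole replacement scan is a single write at (r, c) when that cell exists.
lemma pv_repl_outer (v : Option String) (r c : Nat)
    (rows : List (List (Option String))) (k : Nat) (nb : List (List (Option String))) :
  (PySem.List.enumerate rows (k : Int)).foldl
    (fun nb rp => (PySem.List.enumerate rp.2 0).foldl
      (fun nb2 cp =>
        if (rp.1, cp.1) = ((r : Int), (c : Int)) then
          PySem.List.pySetD nb2 rp.1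
            (PySem.List.pySetD (PySem.List.pyGetD nb2 rp.1 []) cp.1 v)
        else nb2) nb) nb
  = if k ≤ r ∧ r - k < rows.length ∧ c < (rows.getD (r - k) []).length then
      PySem.List.pySetD nb (r : Int)
        (PySem.List.pySetD (PySem.List.pyGetD nb (r : Int) []) (c : Int) v)
    else nb := by
  induction rows generalizing k nb with
  | nil => simp [PySem.List.enumerate_nil]
  | cons row rest ih =>
    rw [PySem.List.enumerate_cons]
    simp only [List.foldl_cons]
    by_cases hk : k = r
    · subst hk
      have hinner := pv_repl_inner_eq v k c row 0 nb
      simp only [Nat.cast_zero] at hinner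
      rw [hinner]
      have htail : ((k : Int) + 1) = (((k + 1 : Nat)) : Int) := by push_cast; ring
      rw [htail, ih]
      have hrest : ¬(k + 1 ≤ k ∧ k - (k + 1) < rest.length ∧ c < (rest.getD (k - (k + 1)) []).length) := by omega
      rw [if_neg hrest]
      have hcond : (0 ≤ c ∧ c - 0 < row.length) ↔ (k ≤ k ∧ k - k < (row :: rest).length ∧ c < ((row :: rest).getD (k - k) []).length) := by
        simp
      rw [if_congr hcond rfl rfl]
    · rw [pv_repl_inner_none v ((r : Int), (c : Int)) (k : Int) row 0 nb
        (by intro p hp; simp only [ne_eq, Prod.mk.injEq, not_and]; intro hh; exact absurd (by exact_mod_cast hh) hk)]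
      have htail : ((k : Int) + 1) = (((k + 1 : Nat)) : Int) := by push_cast; ring
      rw [htail, ih]
      by_cases hkr : k < r
      · have hcond : (k + 1 ≤ r ∧ r - (k + 1) < rest.length ∧ c < (rest.getD (r - (k + 1)) []).length) ↔
            (k ≤ r ∧ r - k < (row :: rest).length ∧ c < ((row :: rest).getD (r - k) []).length) := by
          have hgd : (row :: rest).getD (r - k) [] = rest.getD (r - (k + 1)) [] := by
            have : r - k = (r - (k + 1)) + 1 := by omega
            rw [this]; rfl
          rw [hgd]
          simp only [List.length_cons]
          omega
        rw [if_congr hcond rfl rfl]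
      · have h1 : ¬(k + 1 ≤ r ∧ r - (k + 1) < rest.length ∧ c < (rest.getD (r - (k + 1)) []).length) := by omega
        have h2 : ¬(k ≤ r ∧ r - k < (row :: rest).length ∧ c < ((row :: rest).getD (r - k) []).length) := by
          intro h; exact hk (by omega)
        rw [if_neg h1, if_neg h2]


-- pv_repl_outer at the top level (offset 0).
lemma pv_repl_outer0 (v : Option String) (r c : Nat)
    (rows : List (List (Option String))) (nb : List (List (Option String))) :
  (PySem.List.enumerate rows 0).foldl
    (fun nb rp => (PySem.List.enumerate rp.2 0).foldl
      (fun nb2 cp =>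
        if (rp.1, cp.1) = ((r : Int), (c : Int)) then
          PySem.List.pySetD nb2 rp.1
            (PySem.List.pySetD (PySem.List.pyGetD nb2 rp.1 []) cp.1 v)
        else nb2) nb) nb
  = if r < rows.length ∧ c < (rows.getD r []).length then
      PySem.List.pySetD nb (r : Int)
        (PySem.List.pySetD (PySem.List.pyGetD nb (r : Int) []) (c : Int) v)
    else nb := by
  have h := pv_repl_outer v r c rows 0 nb
  simp only [Nat.cast_zero, Nat.sub_zero] at h
  rw [h]
  have hiff : (0 ≤ r ∧ r < rows.length ∧ c < (rows.getD r []).length) ↔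
      (r < rows.length ∧ c < (rows.getD r []).length) := by omega
  rw [if_congr hiff rfl rfl]

theorem result_spec : Claim_equal_result := by
  intro board action _hdom hpre
  obtain ⟨r, c, hcell, haction⟩ := hpre
  show result board action = result_alt board action
  unfold result result_alt actionsA playerA
  subst haction
  simp only [pv_bfold_split, PySem.List.foldl_append_singleton_eq_self, List.nil_append]
  congr 1
  rw [pv_repl_outer0]
  rw [if_pos ⟨r.isLt, by rw [List.getD_eq_getElem _ _ r.isLt]; exact c.isLt⟩]
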